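-- pv_equiv track=rewrite | github.com/rm12000356/BPSK-perceptron-ml | BPSK_perceptron/data_utils.py | labels_creation_Symmetric
-- ===== SOURCE A (Python) =====
-- def labels_creation_Symmetric(NUM_OF_POINTS):
--     """
--     Create symmetric labels for BPSK (e.g., [1, -1] for 2 points).
--
--     Args:
--         num_points (int): Number of constellation points.
--
--     Returns:
--         list: Symmetric labels (e.g., [1, -1] for BPSK).
--     """
--     base=0
--     possible_labels = []
--     for l in range(0,NUM_OF_POINTS):
--         if l%2 == 0:
--             possible_labels.append(1 + base * 2)
--         else:
--             possible_labels.append(-1 - base * 2)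
--             base=base+1
--     return possible_labels
-- ===== SOURCE B (Python) =====
-- def labels_creation_Symmetric(NUM_OF_POINTS):
--     """Symmetric BPSK labels, built pair by pair: each odd magnitude with its negation."""
--     possible_labels = []
--     for m in range(1, NUM_OF_POINTS, 2):
--         possible_labels += [m, -m]
--     if NUM_OF_POINTS > 0 and NUM_OF_POINTS % 2 == 1:
--         possible_labels.append(NUM_OF_POINTS)
--     return possible_labels
-- ===== Notes on version B (the rewrite author's own statement) =====
-- stated objective: alternative
-- what changed: Instead of A's per-index loop threading a running `base` counter, B iterates over the odd magnitudes with a stride-2 range, emitting each magnitude together with its negation as a pair, and appends the single unpaired label when the count is odd.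
import Mathlib
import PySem

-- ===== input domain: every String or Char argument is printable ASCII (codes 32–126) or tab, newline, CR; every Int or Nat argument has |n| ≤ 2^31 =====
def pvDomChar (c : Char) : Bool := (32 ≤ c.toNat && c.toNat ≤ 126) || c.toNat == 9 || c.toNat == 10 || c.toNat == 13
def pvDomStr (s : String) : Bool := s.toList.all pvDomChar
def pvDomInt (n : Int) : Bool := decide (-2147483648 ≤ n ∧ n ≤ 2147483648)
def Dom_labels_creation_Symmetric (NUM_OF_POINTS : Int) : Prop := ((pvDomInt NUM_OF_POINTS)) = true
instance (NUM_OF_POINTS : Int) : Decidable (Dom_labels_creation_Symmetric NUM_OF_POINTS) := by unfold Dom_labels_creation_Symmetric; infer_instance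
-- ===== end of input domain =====

-- B builds the list pair by pair over the odd magnitudes (each with its negation,
-- plus an unpaired tail when the count is odd) instead of A's per-index loop
-- threading a running `base`; objective: alternative.

-- ===== PORT A =====
def labels_creation_Symmetric (NUM_OF_POINTS : Int) : List Int :=
  (((PySem.List.pyRange 0 NUM_OF_POINTS 1).foldl
      (fun (st : Int × List Int) l =>
        if PySem.Int.mod l 2 = 0 then (st.1, st.2 ++ [1 + st.1 * 2])
        else (st.1 + 1, st.2 ++ [-1 - st.1 * 2]))
      (0, []))).2

-- ===== PORT B =====
def labels_creation_Symmetric_alt (NUM_OF_POINTS : Int) : List Int :=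
  let possible_labels :=
    (PySem.List.pyRange 1 NUM_OF_POINTS 2).foldl
      (fun (acc : List Int) m => acc ++ [m, -m]) []
  if 0 < NUM_OF_POINTS ∧ PySem.Int.mod NUM_OF_POINTS 2 = 1 then
    possible_labels ++ [NUM_OF_POINTS]
  else possible_labels

-- ===== PRECONDITION & SPEC =====
def Spec_labels_creation_Symmetric (NUM_OF_POINTS : Int) (out : List Int) : Prop := out = labels_creation_Symmetric_alt NUM_OF_POINTS
instance (NUM_OF_POINTS : Int) (out : List Int) : Decidable (Spec_labels_creation_Symmetric NUM_OF_POINTS out) := by unfold Spec_labels_creation_Symmetric; infer_instance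

-- ===== CLAIM =====
def Claim_equal_labels_creation_Symmetric : Prop := ∀ (NUM_OF_POINTS : Int), Dom_labels_creation_Symmetric NUM_OF_POINTS → Spec_labels_creation_Symmetric NUM_OF_POINTS (labels_creation_Symmetric NUM_OF_POINTS)

-- ===== LEMMAS AND PROOFS =====

-- Invariant of A's loop over range(0, n): the base equals n / 2 and the list so
-- far equals the closed-form map over the same range.
theorem pv_fold_inv (n : Nat) :
    (PySem.List.pyRange 0 (n : Int) 1).foldl
      (fun (st : Int × List Int) l =>
        if PySem.Int.mod l 2 = 0 then (st.1, st.2 ++ [1 + st.1 * 2])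
        else (st.1 + 1, st.2 ++ [-1 - st.1 * 2]))
      (0, []) =
    (((n / 2 : Nat) : Int),
      (PySem.List.pyRange 0 (n : Int) 1).map (fun i =>
        (2 * PySem.Int.floordiv i 2 + 1) * (if PySem.Int.mod i 2 = 0 then 1 else -1))) := by
  induction n with
  | zero => simp
  | succ n ih =>
      have h : PySem.List.pyRange 0 ((n + 1 : Nat) : Int) 1
          = PySem.List.pyRange 0 (n : Int) 1 ++ [(n : Int)] := by
        push_cast
        exact PySem.List.pyRange_one_succ_right (by exact_mod_cast Nat.zero_le n)
      rw [h, List.foldl_append, ih, List.map_append]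
      have hdiv : PySem.Int.floordiv (n : Int) 2 = ((n / 2 : Nat) : Int) :=
        PySem.Int.floordiv_natCast n 2
      have hmod : PySem.Int.mod (n : Int) 2 = ((n % 2 : Nat) : Int) :=
        PySem.Int.mod_natCast n 2
      rcases Nat.even_or_odd n with he | ho
      · have h2 : n % 2 = 0 := Nat.even_iff.mp he
        simp only [List.foldl_cons, List.foldl_nil, List.map_cons, List.map_nil,
          hmod, hdiv, h2, Nat.cast_zero]
        have h1 : ((n + 1) / 2 : Nat) = n / 2 := by omega
        rw [h1]
        norm_num
        ring
      · have h2 : n % 2 = 1 := Nat.odd_iff.mp ho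
        simp only [List.foldl_cons, List.foldl_nil, List.map_cons, List.map_nil,
          hmod, hdiv, h2, Nat.cast_one, if_neg one_ne_zero]
        have h1 : ((n + 1) / 2 : Nat) = n / 2 + 1 := by omega
        rw [h1]
        push_cast
        refine Prod.ext rfl ?_
        congr 1
        ring

-- range(1, n, 2) lists the odd magnitudes 1 + 2k for k < n/2.
theorem pv_range2 (n : Nat) :
    PySem.List.pyRange 1 (n : Int) 2
      = (List.range (n / 2)).map (fun k : Nat => 1 + 2 * (k : Int)) := by
  rw [PySem.List.pyRange_of_pos 1 (n : Int) (by norm_num)]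
  by_cases h : (1 : Int) < (n : Int)
  · rw [if_pos h]
    have hc : (((n : Int) - 1 + 2 - 1) / 2).toNat = n / 2 := by
      have he : ((n : Int) - 1 + 2 - 1) = (n : Int) := by ring
      rw [he]
      omega
    rw [hc]
  · rw [if_neg h]
    have h0 : n / 2 = 0 := by omega
    rw [h0]

-- B equals the closed-form map that A's fold produces.
theorem pv_alt_eq_map (n : Nat) :
    labels_creation_Symmetric_alt (n : Int)
      = (PySem.List.pyRange 0 (n : Int) 1).map (fun i =>
          (2 * PySem.Int.floordiv i 2 + 1) * (if PySem.Int.mod i 2 = 0 then 1 else -1)) := by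
  induction n with
  | zero =>
      unfold labels_creation_Symmetric_alt
      decide
  | succ n ih =>
      have hr : PySem.List.pyRange 0 ((n + 1 : Nat) : Int) 1
          = PySem.List.pyRange 0 (n : Int) 1 ++ [(n : Int)] := by
        push_cast
        exact PySem.List.pyRange_one_succ_right (by exact_mod_cast Nat.zero_le n)
      have hdiv : PySem.Int.floordiv (n : Int) 2 = ((n / 2 : Nat) : Int) :=
        PySem.Int.floordiv_natCast n 2
      have hmod : PySem.Int.mod (n : Int) 2 = ((n % 2 : Nat) : Int) :=
        PySem.Int.mod_natCast n 2
      have hmodn1 : PySem.Int.mod ((n + 1 : Nat) : Int) 2 = (((n + 1) % 2 : Nat) : Int) :=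
        PySem.Int.mod_natCast (n + 1) 2
      rw [hr, List.map_append, ← ih]
      unfold labels_creation_Symmetric_alt
      rw [pv_range2 n, pv_range2 (n + 1)]
      rcases Nat.even_or_odd n with he | ho
      · -- n even: range unchanged, the new (even-index) element is the odd tail n+1
        have h2 : n % 2 = 0 := Nat.even_iff.mp he
        have h1 : (n + 1) / 2 = n / 2 := by omega
        have h3 : (n + 1) % 2 = 1 := by omega
        rw [h1]
        rw [if_pos ⟨by exact_mod_cast Nat.succ_pos n, by rw [hmodn1, h3]; norm_num⟩]
        rw [if_neg (by rw [hmod, h2]; simp)]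
        have hval : ((2 * PySem.Int.floordiv (n : Int) 2 + 1) *
            (if PySem.Int.mod (n : Int) 2 = 0 then 1 else -1) : Int) = ((n + 1 : Nat) : Int) := by
          rw [hdiv, hmod, h2]
          norm_num
          omega
        simp only [List.map_cons, List.map_nil, hval]
      · -- n odd: range gains the pair [n, -n]; the old tail [n] is absorbed
        have h2 : n % 2 = 1 := Nat.odd_iff.mp ho
        have h1 : (n + 1) / 2 = n / 2 + 1 := by omega
        have h3 : (n + 1) % 2 = 0 := by omega
        rw [h1, List.range_succ, List.map_append, List.foldl_append]
        rw [if_neg (by rw [hmodn1, h3]; simp)]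
        rw [if_pos ⟨by exact_mod_cast Nat.pos_of_ne_zero (by omega), by rw [hmod, h2]; norm_num⟩]
        have hm : (1 + 2 * ((n / 2 : Nat) : Int)) = (n : Int) := by omega
        have hval : ((2 * PySem.Int.floordiv (n : Int) 2 + 1) *
            (if PySem.Int.mod (n : Int) 2 = 0 then 1 else -1) : Int) = -(n : Int) := by
          rw [hdiv, hmod, h2]
          norm_num
          omega
        simp only [List.foldl_cons, List.foldl_nil, List.map_cons, List.map_nil, hm, hval]
        rw [List.append_assoc]
        rfl

-- ===== VERDICT =====
theorem labels_creation_Symmetric_spec : Claim_equal_labels_creation_Symmetric := by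
  intro N _
  unfold Spec_labels_creation_Symmetric
  by_cases h : 0 ≤ N
  · obtain ⟨n, rfl⟩ : ∃ n : Nat, N = (n : Int) := ⟨N.toNat, (Int.toNat_of_nonneg h).symm⟩
    rw [pv_alt_eq_map]
    unfold labels_creation_Symmetric
    rw [pv_fold_inv]
  · unfold labels_creation_Symmetric labels_creation_Symmetric_alt
    have hn1 : ¬ (1:Int) < N := by omega
    have hn2 : ¬ ((0:Int) < N ∧ PySem.Int.mod N 2 = 1) := fun hc => absurd hc.1 (by omega)
    rw [PySem.List.pyRange_one_eq_nil (by omega),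
        PySem.List.pyRange_of_pos 1 N (by norm_num), if_neg hn1, if_neg hn2]
    simp
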